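-- pv_equiv track=rewrite | github.com/RONErony2/OJT-tasks | python/chairs.py | find_minimum_chairs
-- ===== SOURCE A (Python) =====
-- def find_minimum_chairs(val):
--     available_chairs = 0
--     seats_required = 0
--     dict_ = {'C':1, 'R':-1, 'U':1, 'L':-1}
--     for v in val:
--         if dict_[v] == 1:
--             if available_chairs > 0:
--                 available_chairs -= 1
--             else:
--                 seats_required += 1
--         else:
--             available_chairs += 1
--     return seats_required
-- ===== SOURCE B (Python) =====
-- def find_minimum_chairs(val):
--     delta = {'C': 1, 'R': -1, 'U': 1, 'L': -1}
--     best = total = 0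
--     for v in val:
--         total += delta[v]
--         if total > best:
--             best = total
--     return best
-- ===== Notes on version B (the rewrite author's own statement) =====
-- stated objective: simpler
-- what changed: Replaces the available-chairs/seats-required simulation with a running prefix sum of the +1/-1 deltas whose maximum (floored at 0) is returned, using the identity seats_required = max(0, max prefix sum).
import Mathlib
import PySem

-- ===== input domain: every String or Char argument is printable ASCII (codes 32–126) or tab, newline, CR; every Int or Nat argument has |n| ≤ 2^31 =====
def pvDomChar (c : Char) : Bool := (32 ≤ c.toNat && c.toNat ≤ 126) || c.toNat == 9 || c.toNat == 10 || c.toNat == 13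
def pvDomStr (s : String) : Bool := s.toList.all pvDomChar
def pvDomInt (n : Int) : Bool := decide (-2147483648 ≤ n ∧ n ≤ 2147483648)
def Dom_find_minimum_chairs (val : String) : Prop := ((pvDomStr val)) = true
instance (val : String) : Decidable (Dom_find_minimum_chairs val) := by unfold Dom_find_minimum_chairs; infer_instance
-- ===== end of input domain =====

-- B replaces A's available/required chair simulation by a running prefix sum whose
-- maximum (floored at 0) is returned; objective: simpler. Same O(n) cost.

-- ===== PORT A =====
-- the dict {'C':1,'R':-1,'U':1,'L':-1}; under Pre_ every looked-up char is a key,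
-- so the total if-chain is exact on all admitted inputs (KeyError inputs are outside Pre_)
def pvDelta (c : Char) : Int :=
  if c = 'C' then 1 else if c = 'U' then 1 else -1

def find_minimum_chairs (val : String) : Int :=
  (val.toList.foldl
    (fun st v =>
      if pvDelta v = 1 then
        if st.1 > 0 then (st.1 - 1, st.2) else (st.1, st.2 + 1)
      else (st.1 + 1, st.2))
    ((0 : Int), (0 : Int))).2

-- ===== PORT B =====
def find_minimum_chairs_alt (val : String) : Int :=
  (val.toList.foldl
    (fun st v =>
      let total := st.1 + pvDelta v
      (total, if total > st.2 then total else st.2))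
    ((0 : Int), (0 : Int))).2

-- ===== PRECONDITION & SPEC =====
-- Pre_ excludes exactly the inputs with a character outside the dict's keys, on which
-- the Python A (and B alike) raises KeyError.
def Pre_find_minimum_chairs (val : String) : Prop :=
  (val.toList.all (fun c => c = 'C' || c = 'R' || c = 'U' || c = 'L')) = true
instance (val : String) : Decidable (Pre_find_minimum_chairs val) := by
  unfold Pre_find_minimum_chairs; infer_instance

def pvWitness_find_minimum_chairs : String := "CCRUL"

def Spec_find_minimum_chairs (val : String) (out : Int) : Prop := out = find_minimum_chairs_alt val
instance (val : String) (out : Int) : Decidable (Spec_find_minimum_chairs val out) := by unfold Spec_find_minimum_chairs; infer_instance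

-- ===== CLAIM (what is proved, stated in full; the proofs are below) =====
def Claim_equal_find_minimum_chairs : Prop := ∀ (val : String), Dom_find_minimum_chairs val → Pre_find_minimum_chairs val → Spec_find_minimum_chairs val (find_minimum_chairs val)

-- ===== LEMMAS AND PROOFS =====

-- Loop invariant: A's state (available, required) and B's state (total, best) satisfy
-- 0 ≤ available, required = best, total = best - available; then the final .2's agree.
theorem pvChairs_inv (l : List Char) (a r s b : Int)
    (ha : 0 ≤ a) (hr : r = b) (hs : s = b - a) :
    (l.foldl
      (fun st v =>
        if pvDelta v = 1 then
          if st.1 > 0 then (st.1 - 1, st.2) else (st.1, st.2 + 1)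
        else (st.1 + 1, st.2))
      (a, r)).2 =
    (l.foldl
      (fun st v =>
        let total := st.1 + pvDelta v
        (total, if total > st.2 then total else st.2))
      (s, b)).2 := by
  induction l generalizing a r s b with
  | nil => simpa using hr
  | cons c t ih =>
    simp only [List.foldl_cons]
    by_cases hc : pvDelta c = 1
    · rw [hc]
      by_cases hpos : a > 0
      · simp only [if_pos hpos]
        have hle : ¬ (s + 1 > b) := by omega
        simp only [if_neg hle]
        exact ih (a - 1) r (s + 1) b (by omega) hr (by omega)
      · simp only [if_neg hpos]
        have hgt : s + 1 > b := by omega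
        simp only [if_pos hgt]
        exact ih a (r + 1) (s + 1) (s + 1) ha (by omega) (by omega)
    · have hm1 : pvDelta c = -1 := by
        unfold pvDelta at hc ⊢; split_ifs at hc ⊢ <;> omega
      simp only [if_neg hc]
      rw [hm1]
      have hle : ¬ (s + -1 > b) := by omega
      simp only [if_neg hle]
      exact ih (a + 1) r (s + -1) b (by omega) hr (by omega)

-- ===== VERDICT (by name: the statement is the Claim_ definition above) =====
theorem find_minimum_chairs_spec : Claim_equal_find_minimum_chairs := by
  intro val _ _
  unfold Spec_find_minimum_chairs find_minimum_chairs find_minimum_chairs_alt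
  exact pvChairs_inv val.toList 0 0 0 0 (by omega) rfl (by omega)
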